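-- pv_equiv track=rewrite | github.com/shivrajd/ai-csr-langgraph-project | src/agent/tools/fitments_tools.py | _format_vehicle_results
-- ===== SOURCE A (Python) =====
-- from typing import List, Dict, Any
--
-- def _format_vehicle_results(results: List[Dict[str, Any]], battery_model: str) -> str:
--     """Format vehicle search results for customer presentation.
--
--     Args:
--         results: List of vehicle matches from retriever
--         battery_model: The battery model searched for
--
--     Returns:
--         Formatted string with compatible vehicles
--     """
--     if not results:
--         return f"No compatible vehicles found for battery {battery_model}."
--
--     # Deduplicate by make/model/year
--     seen_vehicles = set()
--     unique_vehicles = []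
--     for r in results:
--         key = (r.get("make", ""), r.get("model", ""), r.get("year", ""))
--         if key not in seen_vehicles:
--             seen_vehicles.add(key)
--             unique_vehicles.append(r)
--
--     if not unique_vehicles:
--         return f"No compatible vehicles found for battery {battery_model}."
--
--     lines = [f"**Vehicles Compatible with {battery_model}:**\n"]
--
--     # Group by make for better organization
--     vehicles_by_make: Dict[str, List[Dict]] = {}
--     for v in unique_vehicles:
--         make = v.get("make", "Other")
--         if make not in vehicles_by_make:
--             vehicles_by_make[make] = []
--         vehicles_by_make[make].append(v)
--
--     for make in sorted(vehicles_by_make.keys()):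
--         lines.append(f"\n**{make}:**")
--         for v in vehicles_by_make[make][:10]:  # Limit per make
--             model = v.get("model", "")
--             year = v.get("year", "")
--             if model:
--                 lines.append(f"  - {model} ({year})" if year else f"  - {model}")
--
--     total = len(unique_vehicles)
--     if total > 30:
--         lines.append(f"\n*...and {total - 30} more vehicles*")
--
--     return "\n".join(lines)
-- ===== SOURCE B (Python) =====
-- def _format_vehicle_results(results, battery_model):
--     """Format vehicle search results for customer presentation.
--
--     Re-implementation: dedup via a dict keyed by (make, model, year) using
--     setdefault (first occurrence wins), then one sorted pass over the distinct
--     makes with per-make list comprehensions, assembled as header + body + tail.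
--     """
--     first = {}
--     for r in results:
--         first.setdefault((r.get("make", ""), r.get("model", ""), r.get("year", "")), r)
--     unique = list(first.values())
--     if not unique:
--         return f"No compatible vehicles found for battery {battery_model}."
--
--     header = [f"**Vehicles Compatible with {battery_model}:**\n"]
--     body = []
--     for make in sorted({v.get("make", "Other") for v in unique}):
--         group = [u for u in unique if u.get("make", "Other") == make][:10]
--         body.append(f"\n**{make}:**")
--         body.extend(_line(v) for v in group if v.get("model", ""))
--     tail = [f"\n*...and {len(unique) - 30} more vehicles*"] if len(unique) > 30 else []
--     return "\n".join(header + body + tail)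
--
--
-- def _line(v):
--     model, year = v.get("model", ""), v.get("year", "")
--     return f"  - {model} ({year})" if year else f"  - {model}"
-- ===== Notes on version B (the rewrite author's own statement) =====
-- stated objective: idiomatic
-- what changed: Replaces the set+list dedup loop with a single dict keyed by (make,model,year) via setdefault, and replaces the dict-of-buckets grouping pass entirely by one sorted pass over the distinct makes with a per-make filter comprehension; output assembled as header + body + tail instead of one mutated lines list.
import Mathlib
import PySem

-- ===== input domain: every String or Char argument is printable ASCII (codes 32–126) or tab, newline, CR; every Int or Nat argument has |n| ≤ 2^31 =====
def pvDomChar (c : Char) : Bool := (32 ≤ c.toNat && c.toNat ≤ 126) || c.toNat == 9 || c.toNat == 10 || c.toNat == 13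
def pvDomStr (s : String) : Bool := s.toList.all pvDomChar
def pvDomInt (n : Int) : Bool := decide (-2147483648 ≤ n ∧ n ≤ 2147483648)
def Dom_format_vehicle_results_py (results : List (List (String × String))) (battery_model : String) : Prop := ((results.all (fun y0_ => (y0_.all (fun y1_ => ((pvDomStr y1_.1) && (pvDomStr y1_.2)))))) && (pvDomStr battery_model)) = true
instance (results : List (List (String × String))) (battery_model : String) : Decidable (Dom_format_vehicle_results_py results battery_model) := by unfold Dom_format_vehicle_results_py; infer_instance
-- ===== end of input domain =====

-- B re-implements the formatter with a setdefault-dict dedup and a single sorted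
-- pass over the distinct makes with per-make filters (no dict of buckets);
-- objective: simpler/idiomatic, same cost.

-- shared transliteration of r.get(k, default): first-match lookup on the association list
def pvGetD (r : List (String × String)) (k d : String) : String := (PySem.Dict.mk r).getD k d

-- shared transliteration of the dedup key (r.get("make",""), r.get("model",""), r.get("year",""))
def pvKey (r : List (String × String)) : String × String × String :=
  (pvGetD r "make" "", pvGetD r "model" "", pvGetD r "year" "")

-- ===== PORT A =====
def format_vehicle_results_py (results : List (List (String × String))) (battery_model : String) : String :=
  if results = [] then
    "No compatible vehicles found for battery " ++ battery_model ++ "."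
  else
    -- seen_vehicles set + unique_vehicles list, built in one loop
    let st := results.foldl
      (fun (st : PySem.Set (String × String × String) × List (List (String × String))) r =>
        if PySem.Set.contains st.1 (pvKey r) then st
        else (PySem.Set.add st.1 (pvKey r), st.2 ++ [r]))
      (PySem.Set.empty, [])
    let unique_vehicles := st.2
    if unique_vehicles = [] then
      "No compatible vehicles found for battery " ++ battery_model ++ "."
    else
      let lines0 : List String := ["**Vehicles Compatible with " ++ battery_model ++ ":**\n"]
      -- "if make not in d: d[make] = []" followed by "d[make].append(v)" is exactly modify make [] (· ++ [v])
      let vehicles_by_make : PySem.Dict String (List (List (String × String))) :=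
        unique_vehicles.foldl
          (fun d v => d.modify (pvGetD v "make" "Other") [] (fun x => x ++ [v])) PySem.Dict.empty
      let lines1 := (PySem.List.sorted vehicles_by_make.keys (fun x => x) false).foldl
        (fun lines make =>
          (PySem.List.slice (vehicles_by_make.getD make []) none (some 10)).foldl
            (fun lines v =>
              if pvGetD v "model" "" ≠ "" then
                lines ++ [if pvGetD v "year" "" ≠ "" then
                    "  - " ++ pvGetD v "model" "" ++ " (" ++ pvGetD v "year" "" ++ ")"
                  else "  - " ++ pvGetD v "model" ""]
              else lines)
            (lines ++ ["\n**" ++ make ++ ":**"]))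
        lines0
      let total : Int := unique_vehicles.length
      let lines2 := if total > 30 then
          lines1 ++ ["\n*...and " ++ PySem.Int.toStr (total - 30) ++ " more vehicles*"]
        else lines1
      PySem.Str.join "\n" lines2

-- ===== PORT B =====
-- helper _line(v) of Source B
def pvLine (v : List (String × String)) : String :=
  if pvGetD v "year" "" ≠ "" then
    "  - " ++ pvGetD v "model" "" ++ " (" ++ pvGetD v "year" "" ++ ")"
  else "  - " ++ pvGetD v "model" ""

def format_vehicle_results_py_alt (results : List (List (String × String))) (battery_model : String) : String :=
  let first := results.foldl
    (fun (d : PySem.Dict (String × String × String) (List (String × String))) r =>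
      d.setdefault (pvKey r) r) PySem.Dict.empty
  let unique := first.values
  if unique = [] then
    "No compatible vehicles found for battery " ++ battery_model ++ "."
  else
    let header := ["**Vehicles Compatible with " ++ battery_model ++ ":**\n"]
    -- body.append(header-of-make); body.extend(line for v in group if model)
    let body := (PySem.List.sorted
        (PySem.Set.ofList (unique.map (fun v => pvGetD v "make" "Other"))) (fun x => x) false).foldl
      (fun body make =>
        body ++ (("\n**" ++ make ++ ":**") ::
          (((unique.filter (fun u => pvGetD u "make" "Other" == make)).take 10).filter
            (fun v => decide (pvGetD v "model" "" ≠ ""))).map pvLine))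
      []
    let tail := if (unique.length : Int) > 30 then
        ["\n*...and " ++ PySem.Int.toStr ((unique.length : Int) - 30) ++ " more vehicles*"]
      else []
    PySem.Str.join "\n" (header ++ body ++ tail)

-- ===== PRECONDITION & SPEC =====
def Spec_format_vehicle_results_py (results : List (List (String × String))) (battery_model : String) (out : String) : Prop := out = format_vehicle_results_py_alt results battery_model
instance (results : List (List (String × String))) (battery_model : String) (out : String) : Decidable (Spec_format_vehicle_results_py results battery_model out) := by unfold Spec_format_vehicle_results_py; infer_instance

-- ===== CLAIM (what is proved, stated in full; the proofs are below) =====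
def Claim_equal_format_vehicle_results_py : Prop := ∀ (results : List (List (String × String))) (battery_model : String), Dom_format_vehicle_results_py results battery_model → Spec_format_vehicle_results_py results battery_model (format_vehicle_results_py results battery_model)

-- ===== LEMMAS AND PROOFS =====

-- A's dedup fold (set + list) and B's setdefault-dict fold stay in lockstep:
-- if the dict's items are exactly unique_vehicles paired with their keys, the
-- final unique_vehicles list equals the final dict's value list.
theorem pv_dedup_inv (rs : List (List (String × String)))
    (uniq : List (List (String × String)))
    (d : PySem.Dict (String × String × String) (List (String × String)))
    (h : d.items = uniq.map (fun r => (pvKey r, r))) :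
    (rs.foldl
      (fun (st : PySem.Set (String × String × String) × List (List (String × String))) r =>
        if PySem.Set.contains st.1 (pvKey r) then st
        else (PySem.Set.add st.1 (pvKey r), st.2 ++ [r]))
      (uniq.map pvKey, uniq)).2
    = (rs.foldl (fun d r => d.setdefault (pvKey r) r) d).values := by
  induction rs generalizing uniq d with
  | nil => simp [PySem.Dict.values, h, Function.comp_def]
  | cons r rs ih =>
    have hkeys : d.keys = uniq.map pvKey := by
      simp [PySem.Dict.keys, h, Function.comp_def]
    by_cases hm : pvKey r ∈ uniq.map pvKey
    · have hset : PySem.Set.contains (uniq.map pvKey) (pvKey r) = true := by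
        simpa [PySem.Set.contains_iff] using hm
      have hdict : d.contains (pvKey r) = true := by
        rw [PySem.Dict.contains_eq_decide_mem_keys, hkeys]; simpa using hm
      simp only [List.foldl_cons, hset, if_true, PySem.Dict.setdefault, hdict]
      exact ih uniq d h
    · have hset : PySem.Set.contains (uniq.map pvKey) (pvKey r) = false := by
        simpa [PySem.Set.contains_iff] using hm
      have hdict : d.contains (pvKey r) = false := by
        rw [PySem.Dict.contains_eq_decide_mem_keys, hkeys]; simpa using hm
      simp only [List.foldl_cons, hset, if_false, PySem.Dict.setdefault, hdict, Bool.false_eq_true,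
        PySem.Set.add_of_not_mem hm]
      have h2 : (PySem.Dict.mk (d.items ++ [(pvKey r, r)])).items
          = (uniq ++ [r]).map (fun r => (pvKey r, r)) := by simp [h]
      have := ih (uniq ++ [r]) (PySem.Dict.mk (d.items ++ [(pvKey r, r)])) h2
      simpa [List.map_append] using this

-- A's dedup loop never shrinks unique_vehicles
theorem pv_dedup_ne_nil (rs : List (List (String × String)))
    (s : PySem.Set (String × String × String)) (u : List (List (String × String)))
    (hu : u ≠ []) :
    (rs.foldl
      (fun (st : PySem.Set (String × String × String) × List (List (String × String))) r =>
        if PySem.Set.contains st.1 (pvKey r) then st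
        else (PySem.Set.add st.1 (pvKey r), st.2 ++ [r]))
      (s, u)).2 ≠ [] := by
  induction rs generalizing s u with
  | nil => simpa using hu
  | cons r rs ih =>
    simp only [List.foldl_cons]
    by_cases hcon : PySem.Set.contains s (pvKey r) = true
    · simp only [hcon, if_true]; exact ih s u hu
    · simp only [hcon]
      exact ih _ _ (by simp)

-- A's conditional-append inner loop is a filter-then-map
theorem pv_inner (l : List (List (String × String))) (acc : List String) :
    l.foldl
      (fun lines v =>
        if pvGetD v "model" "" ≠ "" then
          lines ++ [if pvGetD v "year" "" ≠ "" then
              "  - " ++ pvGetD v "model" "" ++ " (" ++ pvGetD v "year" "" ++ ")"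
            else "  - " ++ pvGetD v "model" ""]
        else lines) acc
    = acc ++ (l.filter (fun v => decide (pvGetD v "model" "" ≠ ""))).map pvLine :=
  PySem.List.foldl_append_ite (fun v => pvGetD v "model" "" ≠ "") pvLine l acc

-- the per-make block A emits equals the per-make block B emits
theorem pv_block_eq (uniq : List (List (String × String))) (make : String) (lines : List String) :
    (PySem.List.slice
        ((uniq.foldl (fun d v => d.modify (pvGetD v "make" "Other") [] (fun x => x ++ [v]))
          PySem.Dict.empty).getD make []) none (some 10)).foldl
      (fun lines v =>
        if pvGetD v "model" "" ≠ "" then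
          lines ++ [if pvGetD v "year" "" ≠ "" then
              "  - " ++ pvGetD v "model" "" ++ " (" ++ pvGetD v "year" "" ++ ")"
            else "  - " ++ pvGetD v "model" ""]
        else lines)
      (lines ++ ["\n**" ++ make ++ ":**"])
    = lines ++ (("\n**" ++ make ++ ":**") ::
        (((uniq.filter (fun u => pvGetD u "make" "Other" == make)).take 10).filter
          (fun v => decide (pvGetD v "model" "" ≠ ""))).map pvLine) := by
  have hfold : uniq.foldl (fun d v => d.modify (pvGetD v "make" "Other") [] (fun x => x ++ [v]))
      (PySem.Dict.empty (κ := String) (ν := List (List (String × String))))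
      = (uniq.map (fun v => (pvGetD v "make" "Other", v))).foldl
          (fun d p => d.modify p.1 [] (fun x => x ++ [p.2])) PySem.Dict.empty := by
    rw [List.foldl_map]
  rw [hfold, PySem.Dict.getD_foldl_modify_append, PySem.List.slice_to _ (by norm_num), pv_inner]
  simp [List.filter_map, Function.comp_def, List.append_assoc]

-- the keys of A's grouping dict are exactly set(makes) in first-appearance order
theorem pv_keys_eq (uniq : List (List (String × String))) :
    (uniq.foldl (fun d v => d.modify (pvGetD v "make" "Other") [] (fun x => x ++ [v]))
      (PySem.Dict.empty (κ := String) (ν := List (List (String × String))))).keys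
    = PySem.Set.ofList (uniq.map (fun v => pvGetD v "make" "Other")) := by
  rw [PySem.Dict.keys_foldl_modify_key uniq (fun v => pvGetD v "make" "Other") []
    (fun _ v => fun x => x ++ [v])]
  simp [PySem.Dict.keys_empty, PySem.Set.update_nil_left]

-- ===== VERDICT (by name: the statement is the Claim_ definition above) =====
theorem format_vehicle_results_py_spec : Claim_equal_format_vehicle_results_py := by
  intro results battery_model _
  unfold Spec_format_vehicle_results_py
  unfold format_vehicle_results_py format_vehicle_results_py_alt
  cases results with
  | nil => simp [PySem.Dict.values, PySem.Dict.empty]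
  | cons r rs =>
    have huniq : ((r :: rs).foldl
        (fun (st : PySem.Set (String × String × String) × List (List (String × String))) r =>
          if PySem.Set.contains st.1 (pvKey r) then st
          else (PySem.Set.add st.1 (pvKey r), st.2 ++ [r]))
        (PySem.Set.empty, [])).2
        = ((r :: rs).foldl (fun d r => d.setdefault (pvKey r) r) PySem.Dict.empty).values := by
      simpa using pv_dedup_inv (r :: rs) [] PySem.Dict.empty rfl
    have hne : ((r :: rs).foldl
        (fun (st : PySem.Set (String × String × String) × List (List (String × String))) r =>
          if PySem.Set.contains st.1 (pvKey r) then st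
          else (PySem.Set.add st.1 (pvKey r), st.2 ++ [r]))
        (PySem.Set.empty, [])).2 ≠ [] := by
      have h1 : PySem.Set.contains (PySem.Set.empty (α := String × String × String)) (pvKey r) = false := rfl
      simp only [List.foldl_cons, h1, Bool.false_eq_true, if_false]
      exact pv_dedup_ne_nil rs _ _ (by simp)
    simp only [List.cons_ne_nil, if_false, ← huniq, if_neg hne]
    congr 1
    rw [pv_keys_eq]
    have hstep : (fun (lines : List String) make =>
        (PySem.List.slice
          ((((r :: rs).foldl
              (fun (st : PySem.Set (String × String × String) × List (List (String × String))) r =>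
                if PySem.Set.contains st.1 (pvKey r) then st
                else (PySem.Set.add st.1 (pvKey r), st.2 ++ [r]))
              (PySem.Set.empty, [])).2.foldl
            (fun d v => d.modify (pvGetD v "make" "Other") [] (fun x => x ++ [v]))
            PySem.Dict.empty).getD make []) none (some 10)).foldl
          (fun lines v =>
            if pvGetD v "model" "" ≠ "" then
              lines ++ [if pvGetD v "year" "" ≠ "" then
                  "  - " ++ pvGetD v "model" "" ++ " (" ++ pvGetD v "year" "" ++ ")"
                else "  - " ++ pvGetD v "model" ""]
            else lines)
          (lines ++ ["\n**" ++ make ++ ":**"]))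
        = (fun (lines : List String) make => lines ++ (("\n**" ++ make ++ ":**") ::
            (((((r :: rs).foldl
                (fun (st : PySem.Set (String × String × String) × List (List (String × String))) r =>
                  if PySem.Set.contains st.1 (pvKey r) then st
                  else (PySem.Set.add st.1 (pvKey r), st.2 ++ [r]))
                (PySem.Set.empty, [])).2.filter
              (fun u => pvGetD u "make" "Other" == make)).take 10).filter
              (fun v => decide (pvGetD v "model" "" ≠ ""))).map pvLine)) := by
      funext lines make
      exact pv_block_eq _ make lines
    rw [hstep, PySem.List.foldl_append_eq_flatMap, PySem.List.foldl_append_eq_flatMap]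
    by_cases h30 : (((r :: rs).foldl
        (fun (st : PySem.Set (String × String × String) × List (List (String × String))) r =>
          if PySem.Set.contains st.1 (pvKey r) then st
          else (PySem.Set.add st.1 (pvKey r), st.2 ++ [r]))
        (PySem.Set.empty, [])).2.length : Int) > 30
    · simp only [h30, if_true, List.nil_append, List.append_assoc]
    · simp only [h30, if_false, List.nil_append, List.append_assoc, List.append_nil]
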